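-- pv_equiv track=rewrite | github.com/GAUTAM-2024/Jewel_Data_Extraction | ExtractionEngine/extraction_dynamic.py | strip_to_jpg
-- ===== SOURCE A (Python) =====
-- def strip_to_jpg(url: str) -> str:
--     """Return substring up to and including .jpg or .png (case-insensitive). If neither found, return original."""
--     url_lower = url.lower()
--     idx_jpg = url_lower.find('.jpg')
--     idx_png = url_lower.find('.png')
--     # Find the first occurrence of either extension
--     idxs = [i for i in [idx_jpg, idx_png] if i != -1]
--     if idxs:
--         idx = min(idxs)
--         return url[:idx+4]
--     return url
-- ===== SOURCE B (Python) =====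
-- def strip_to_jpg(url: str) -> str:
--     """Return substring up to and including .jpg or .png (case-insensitive). If neither found, return original."""
--     for i in range(len(url) - 3):
--         if url[i:i + 4].lower() in ('.jpg', '.png'):
--             return url[:i + 4]
--     return url
-- ===== Notes on version B (the rewrite author's own statement) =====
-- stated objective: alternative
-- what changed: B replaces the lower-the-whole-string + two find() passes + filter/min decomposition with a single left-to-right scan that stops at the first 4-char window equal to '.jpg' or '.png' case-insensitively.
import Mathlib
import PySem

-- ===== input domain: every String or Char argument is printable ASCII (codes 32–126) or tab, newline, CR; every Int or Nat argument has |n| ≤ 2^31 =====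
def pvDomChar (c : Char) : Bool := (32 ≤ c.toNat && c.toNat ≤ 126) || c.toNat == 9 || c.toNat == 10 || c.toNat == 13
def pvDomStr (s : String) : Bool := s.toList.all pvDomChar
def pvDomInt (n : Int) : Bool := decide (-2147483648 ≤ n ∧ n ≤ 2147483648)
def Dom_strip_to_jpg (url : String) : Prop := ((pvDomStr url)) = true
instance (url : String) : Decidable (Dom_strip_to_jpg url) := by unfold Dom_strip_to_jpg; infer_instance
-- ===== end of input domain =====

-- B replaces the lower-whole-string + two find() passes + filter/min decomposition by a
-- single left-to-right scan stopping at the first case-insensitive '.jpg'/'.png' window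
-- (objective: alternative; same value on every input).

-- ===== PORT A =====
def strip_to_jpg (url : String) : String :=
  let url_lower := PySem.Str.lower url
  let idx_jpg := PySem.Str.find url_lower ".jpg"
  let idx_png := PySem.Str.find url_lower ".png"
  let idxs := [idx_jpg, idx_png].filter (fun i => i != -1)
  if idxs ≠ [] then
    match PySem.List.min? idxs (fun x => x) with
    | some idx => String.ofList (PySem.List.slice url.toList none (some (idx + 4)))
    | none => url   -- unreachable: min() of a nonempty list
  else url

-- ===== PORT B =====
-- loop body of B; url[i:i+4] and url[:i+4] are the nonnegative slices (cs.drop i).take 4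
-- and cs.take (i+4) (exact: PySem.List.slice_toNat)
def strip_alt_go (cs : List Char) (i : Nat) : String :=
  if _h : i + 3 < cs.length then
    let w := PySem.Chars.lower ((cs.drop i).take 4)
    if w = ".jpg".toList ∨ w = ".png".toList then
      String.ofList (cs.take (i + 4))
    else strip_alt_go cs (i + 1)
  else String.ofList cs
termination_by cs.length - i
decreasing_by omega

def strip_to_jpg_alt (url : String) : String := strip_alt_go url.toList 0

-- ===== PRECONDITION & SPEC =====
def Spec_strip_to_jpg (url : String) (out : String) : Prop := out = strip_to_jpg_alt url
instance (url : String) (out : String) : Decidable (Spec_strip_to_jpg url out) := by unfold Spec_strip_to_jpg; infer_instance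

-- ===== CLAIM (what is proved, stated in full; the proofs are below) =====
def Claim_equal_strip_to_jpg : Prop := ∀ (url : String), Dom_strip_to_jpg url → Spec_strip_to_jpg url (strip_to_jpg url)

-- ===== LEMMAS AND PROOFS =====

-- 'an extension starts at position j of the lowered string'
def Pmatch (cs : List Char) (j : Nat) : Prop :=
  ".jpg".toList <+: (PySem.Chars.lower cs).drop j ∨ ".png".toList <+: (PySem.Chars.lower cs).drop j

theorem Pmatch_le (cs : List Char) (j : Nat) (h : Pmatch cs j) : j + 4 ≤ cs.length := by
  have hl : (PySem.Chars.lower cs).length = cs.length := by simp [PySem.Chars.lower]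
  rcases h with h | h <;>
  · have := h.length_le
    simp [hl] at this
    omega

theorem window_iff (cs : List Char) (i : Nat) :
    (PySem.Chars.lower ((cs.drop i).take 4) = ".jpg".toList ∨
     PySem.Chars.lower ((cs.drop i).take 4) = ".png".toList) ↔ Pmatch cs i := by
  have hw : PySem.Chars.lower ((cs.drop i).take 4) = ((PySem.Chars.lower cs).drop i).take 4 := by
    simp [PySem.Chars.lower]
  unfold Pmatch
  rw [hw]
  constructor
  · rintro (h | h) <;> [left; right] <;>
    · rw [List.prefix_iff_eq_take]
      simp [← h]
  · rintro (h | h) <;> [left; right] <;>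
    · rw [List.prefix_iff_eq_take] at h
      simpa using h.symm

theorem go_none (cs : List Char) (hno : ∀ j, ¬ Pmatch cs j) :
    ∀ i, strip_alt_go cs i = String.ofList cs := by
  intro i
  induction hk : cs.length - i using Nat.strong_induction_on generalizing i with
  | _ k ih =>
    unfold strip_alt_go
    split
    · rename_i h
      rw [if_neg]
      · exact ih (cs.length - (i+1)) (by omega) (i+1) rfl
      · intro hw
        exact hno i ((window_iff cs i).mp hw)
    · rfl

theorem go_spec (cs : List Char) (n : Nat) (hP : Pmatch cs n)
    (hmin : ∀ j < n, ¬ Pmatch cs j) :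
    ∀ i ≤ n, strip_alt_go cs i = String.ofList (cs.take (n + 4)) := by
  intro i hi
  induction hk : n - i using Nat.strong_induction_on generalizing i with
  | _ k ih =>
    have hlen := Pmatch_le cs n hP
    unfold strip_alt_go
    rcases eq_or_lt_of_le hi with heq | hlt
    · subst heq
      rw [dif_pos (by omega), if_pos ((window_iff cs i).mpr hP)]
    · rw [dif_pos (by omega), if_neg (fun hw => hmin i hlt ((window_iff cs i).mp hw))]
      exact ih (n - (i+1)) (by omega) (i+1) (by omega) rfl

-- find = -1 means no occurrence at any position
-- find = -1 means no occurrence at any position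
theorem no_occ_of_find_neg (L sub : List Char) (h : PySem.Chars.find L sub = -1) :
    ∀ j, ¬ sub <+: L.drop j := by
  intro j hj
  rw [PySem.Chars.find_eq_neg_one_iff] at h
  exact h (hj.isInfix.trans (List.drop_suffix j L).isInfix)

-- occurrences come only at or after find (when find succeeded)
theorem no_occ_before_find (L sub : List Char) (h : PySem.Chars.find L sub ≠ -1) :
    ∀ j < (PySem.Chars.find L sub).toNat, ¬ sub <+: L.drop j := by
  have h0 : 0 ≤ PySem.Chars.find L sub := by
    have := PySem.Chars.neg_one_le_find L sub
    omega
  exact (PySem.Chars.find_spec h0).2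

theorem occ_at_find (L sub : List Char) (h : PySem.Chars.find L sub ≠ -1) :
    sub <+: L.drop (PySem.Chars.find L sub).toNat := by
  have h0 : 0 ≤ PySem.Chars.find L sub := by
    have := PySem.Chars.neg_one_le_find L sub
    omega
  exact (PySem.Chars.find_spec h0).1

-- ===== VERDICT (by name: the statement is the Claim_ definition above) =====
theorem strip_to_jpg_spec : Claim_equal_strip_to_jpg := by
  intro url _
  unfold Spec_strip_to_jpg strip_to_jpg strip_to_jpg_alt
  simp only [PySem.Str.find_eq, PySem.Str.toList_lower]
  set cs := url.toList with hcs
  set L := PySem.Chars.lower cs with hLdef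
  set fJ := PySem.Chars.find L ".jpg".toList with hfJ
  set fP := PySem.Chars.find L ".png".toList with hfP
  by_cases hJ : fJ = -1 <;> by_cases hPn : fP = -1
  · -- neither extension occurs
    have hno : ∀ j, ¬ Pmatch cs j := by
      rintro j (h | h)
      · exact no_occ_of_find_neg L _ hJ j h
      · exact no_occ_of_find_neg L _ hPn j h
    have hfilter : ([fJ, fP].filter (fun i => i != -1)) = [] := by simp [hJ, hPn]
    rw [go_none cs hno 0, String.ofList_toList, hfilter, if_neg (by simp)]
  · -- only '.png' occurs
    have h0 : 0 ≤ fP := by have := PySem.Chars.neg_one_le_find L ".png".toList; omega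
    have hPm : Pmatch cs fP.toNat := Or.inr (occ_at_find L _ hPn)
    have hmin : ∀ j < fP.toNat, ¬ Pmatch cs j := by
      rintro j hjlt (h | h)
      · exact no_occ_of_find_neg L _ hJ j h
      · exact no_occ_before_find L _ hPn j hjlt h
    have hfilter : ([fJ, fP].filter (fun i => i != -1)) = [fP] := by simp [hJ, hPn]
    rw [go_spec cs fP.toNat hPm hmin 0 (Nat.zero_le _), hfilter,
      if_pos (by simp), PySem.List.min?_id_cons, List.foldl_nil]
    simp only [PySem.List.slice_to cs (by omega : (0 : Int) ≤ fP + 4),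
      show (fP + 4).toNat = (fP).toNat + 4 by omega]
  · -- only '.jpg' occurs
    have h0 : 0 ≤ fJ := by have := PySem.Chars.neg_one_le_find L ".jpg".toList; omega
    have hPm : Pmatch cs fJ.toNat := Or.inl (occ_at_find L _ hJ)
    have hmin : ∀ j < fJ.toNat, ¬ Pmatch cs j := by
      rintro j hjlt (h | h)
      · exact no_occ_before_find L _ hJ j hjlt h
      · exact no_occ_of_find_neg L _ hPn j h
    have hfilter : ([fJ, fP].filter (fun i => i != -1)) = [fJ] := by simp [hJ, hPn]
    rw [go_spec cs fJ.toNat hPm hmin 0 (Nat.zero_le _), hfilter,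
      if_pos (by simp), PySem.List.min?_id_cons, List.foldl_nil]
    simp only [PySem.List.slice_to cs (by omega : (0 : Int) ≤ fJ + 4),
      show (fJ + 4).toNat = (fJ).toNat + 4 by omega]
  · -- both occur: the earlier one wins
    have h0J : 0 ≤ fJ := by have := PySem.Chars.neg_one_le_find L ".jpg".toList; omega
    have h0P : 0 ≤ fP := by have := PySem.Chars.neg_one_le_find L ".png".toList; omega
    have h0m : 0 ≤ min fJ fP := le_min h0J h0P
    have hPm : Pmatch cs (min fJ fP).toNat := by
      rcases le_total fJ fP with hle | hle
      · rw [min_eq_left hle]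
        exact Or.inl (occ_at_find L _ hJ)
      · rw [min_eq_right hle]
        exact Or.inr (occ_at_find L _ hPn)
    have hmin : ∀ j < (min fJ fP).toNat, ¬ Pmatch cs j := by
      intro j hjlt
      have hjJ : j < fJ.toNat := by have := min_le_left fJ fP; omega
      have hjP : j < fP.toNat := by have := min_le_right fJ fP; omega
      rintro (h | h)
      · exact no_occ_before_find L _ hJ j hjJ h
      · exact no_occ_before_find L _ hPn j hjP h
    have hfilter : ([fJ, fP].filter (fun i => i != -1)) = [fJ, fP] := by simp [hJ, hPn]
    rw [go_spec cs (min fJ fP).toNat hPm hmin 0 (Nat.zero_le _), hfilter,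
      if_pos (by simp), PySem.List.min?_id_cons, List.foldl_cons, List.foldl_nil]
    simp only [PySem.List.slice_to cs (by omega : (0 : Int) ≤ min fJ fP + 4),
      show (min fJ fP + 4).toNat = (min fJ fP).toNat + 4 by omega]
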